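-- pv_equiv track=rewrite | github.com/Thirumal255/mutual_fund_advisor | app/doc_extractor.py | find_section_block
-- ===== SOURCE A (Python) =====
-- from typing import List, Dict, Any, Optional
--
-- def find_section_block(
--     paragraphs: List[Dict[str, str]],
--     title_keywords: List[str],
--     max_paras_after: int = 15,
-- ) -> Optional[str]:
--     """
--     Find a paragraph that looks like a real section heading.
--
--     Strategy:
--       - Scan all paragraphs.
--       - Record the first match (first paragraph whose text contains any keyword).
--       - If we find a SECOND match later:
--           -> use the SECOND match as the heading (to skip index/TOC style references).
--       - If there is only one match in the whole document:
--           -> fall back to using the first match.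
--
--     Then return that paragraph + up to max_paras_after following paragraphs.
--     """
--     first_match_idx: Optional[int] = None
--     heading_idx: Optional[int] = None
--
--     for idx, item in enumerate(paragraphs):
--         raw = item.get("text", "")
--         t = raw.lower()
--
--         if any(kw.lower() in t for kw in title_keywords):
--             if first_match_idx is None:
--                 first_match_idx = idx
--                 continue
--             else:
--                 heading_idx = idx
--                 break
--
--     if heading_idx is None:
--         heading_idx = first_match_idx
--
--     if heading_idx is None:
--         return None
--
--     block_paras: List[str] = []
--     for j in range(heading_idx, min(heading_idx + 1 + max_paras_after, len(paragraphs))):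
--         block_paras.append(paragraphs[j].get("text", ""))
--
--     return "\n".join(block_paras)
-- ===== SOURCE B (Python) =====
-- from typing import List, Dict, Optional
--
-- def find_section_block(
--     paragraphs: List[Dict[str, str]],
--     title_keywords: List[str],
--     max_paras_after: int = 15,
-- ) -> Optional[str]:
--     """Index-free suffix decomposition: drop non-matching paragraphs to reach
--     the suffix at the first match, drop again inside its tail to reach the
--     suffix at the second match (preferred, to skip TOC hits), then take the
--     window directly off that suffix and join. No indices, no enumerate, no
--     range arithmetic."""
--     kws = [kw.lower() for kw in title_keywords]
--
--     def drop_to_match(ps):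
--         while ps and not any(kw in ps[0].get("text", "").lower() for kw in kws):
--             ps = ps[1:]
--         return ps
--
--     first = drop_to_match(paragraphs)
--     if not first:
--         return None
--     second = drop_to_match(first[1:])
--     block = second if second else first
--     return "\n".join(item.get("text", "") for item in block[:max(max_paras_after + 1, 0)])
-- ===== Notes on version B (the rewrite author's own statement) =====
-- stated objective: alternative
-- what changed: A's index-based stateful scan (enumerate with first/second-match state and break, then an index-range loop with min() bounds appending texts) is replaced by an index-free suffix computation: two dropwhile-style passes produce the suffix starting at the first match and at the second match inside its tail, the preferred suffix is chosen, and the block is a plain prefix take of that suffix joined with newlines; no indices or range arithmetic occur anywhere.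
import Mathlib
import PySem

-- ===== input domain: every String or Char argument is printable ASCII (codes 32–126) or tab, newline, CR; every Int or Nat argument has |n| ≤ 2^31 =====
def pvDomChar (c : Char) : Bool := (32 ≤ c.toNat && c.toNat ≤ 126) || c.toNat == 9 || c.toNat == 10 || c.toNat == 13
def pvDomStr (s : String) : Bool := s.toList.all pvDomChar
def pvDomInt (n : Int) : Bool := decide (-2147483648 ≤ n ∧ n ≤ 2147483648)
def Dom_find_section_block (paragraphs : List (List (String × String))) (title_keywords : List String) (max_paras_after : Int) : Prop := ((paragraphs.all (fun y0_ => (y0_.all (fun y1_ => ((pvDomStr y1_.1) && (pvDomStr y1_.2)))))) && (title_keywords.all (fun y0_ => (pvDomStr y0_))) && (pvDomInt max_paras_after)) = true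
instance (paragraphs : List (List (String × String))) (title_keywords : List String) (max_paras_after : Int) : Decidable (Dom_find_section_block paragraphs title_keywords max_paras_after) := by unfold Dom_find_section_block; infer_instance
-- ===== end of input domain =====

-- B replaces A's index-based stateful scan + index-range block loop by an index-free
-- suffix decomposition (two drop-to-match passes, then a prefix take); objective: alternative.

-- ===== PORT A =====
-- item.get("text", "")  (both Pythons contain this exact expression)
def pvGetText (item : List (String × String)) : String :=
  (PySem.Dict.mk item).getD "text" ""

-- A's for-loop with break: state = (idx, first_match_idx); returns heading_idx
-- after the fallback 'if heading_idx is None: heading_idx = first_match_idx'.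
def pvScanA (tk : List String) : List (List (String × String)) → Int → Option Int → Option Int
  | [], _, first => first
  | item :: rest, idx, first =>
    if tk.any (fun kw => PySem.Str.isIn (PySem.Str.lower kw) (PySem.Str.lower (pvGetText item))) then
      match first with
      | none => pvScanA tk rest (idx + 1) (some idx)   -- first_match_idx = idx; continue
      | some _ => some idx                              -- heading_idx = idx; break
    else pvScanA tk rest (idx + 1) first

def find_section_block (paragraphs : List (List (String × String))) (title_keywords : List String) (max_paras_after : Int) : Option String :=
  match pvScanA title_keywords paragraphs 0 none with
  | none => none
  | some h =>
    let stop := min (h + 1 + max_paras_after) (paragraphs.length : Int)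
    let block := (PySem.List.pyRange h stop 1).foldl
      (fun acc j => acc ++ [pvGetText (PySem.List.pyGetD paragraphs j [])]) []
    some (PySem.Str.join "\n" block)

-- ===== PORT B =====
-- Source B's drop_to_match: shrink the list until the head matches a (lowered) keyword
def pvDropToMatch (kws : List String) : List (List (String × String)) → List (List (String × String))
  | [] => []
  | x :: xs =>
    if kws.any (fun kw => PySem.Str.isIn kw (PySem.Str.lower (pvGetText x))) then x :: xs
    else pvDropToMatch kws xs

def find_section_block_alt (paragraphs : List (List (String × String))) (title_keywords : List String) (max_paras_after : Int) : Option String :=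
  let kws := title_keywords.map PySem.Str.lower
  match pvDropToMatch kws paragraphs with
  | [] => none
  | x :: rest =>
    let second := pvDropToMatch kws rest
    let block := if second.isEmpty then x :: rest else second
    some (PySem.Str.join "\n"
      ((block.take (max (max_paras_after + 1) 0).toNat).map pvGetText))

-- ===== PRECONDITION & SPEC =====
def Spec_find_section_block (paragraphs : List (List (String × String))) (title_keywords : List String) (max_paras_after : Int) (out : Option String) : Prop := out = find_section_block_alt paragraphs title_keywords max_paras_after
instance (paragraphs : List (List (String × String))) (title_keywords : List String) (max_paras_after : Int) (out : Option String) : Decidable (Spec_find_section_block paragraphs title_keywords max_paras_after out) := by unfold Spec_find_section_block; infer_instance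

-- ===== CLAIM (what is proved, stated in full; the proofs are below) =====
def Claim_equal_find_section_block : Prop := ∀ (paragraphs : List (List (String × String))) (title_keywords : List String) (max_paras_after : Int), Dom_find_section_block paragraphs title_keywords max_paras_after → Spec_find_section_block paragraphs title_keywords max_paras_after (find_section_block paragraphs title_keywords max_paras_after)

-- ===== LEMMAS AND PROOFS =====

-- the boolean match test on one paragraph (A's form)
def pvMatch (tk : List String) (item : List (String × String)) : Bool :=
  tk.any (fun kw => PySem.Str.isIn (PySem.Str.lower kw) (PySem.Str.lower (pvGetText item)))

-- indices (from start s) of matching paragraphs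
def pvMatches (tk : List String) (l : List (List (String × String))) (s : Int) : List Int :=
  ((PySem.List.enumerate l s).filter (fun p => pvMatch tk p.2)).map (·.1)

lemma pvMatches_nil (tk : List String) (s : Int) : pvMatches tk [] s = [] := rfl

lemma pvMatches_cons (tk : List String) (x : List (String × String)) (l : List (List (String × String))) (s : Int) :
    pvMatches tk (x :: l) s =
      if pvMatch tk x then s :: pvMatches tk l (s + 1) else pvMatches tk l (s + 1) := by
  simp [pvMatches, PySem.List.enumerate_cons, List.filter_cons]
  split_ifs <;> simp

lemma pvScanA_cons (tk : List String) (item : List (String × String)) (rest : List (List (String × String))) (idx : Int) (first : Option Int) :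
    pvScanA tk (item :: rest) idx first =
      if pvMatch tk item then
        (match first with
         | none => pvScanA tk rest (idx + 1) (some idx)
         | some _ => some idx)
      else pvScanA tk rest (idx + 1) first := rfl

lemma pvScanA_some (tk : List String) (l : List (List (String × String))) (s f : Int) :
    pvScanA tk l s (some f) =
      match pvMatches tk l s with
      | [] => some f
      | a :: _ => some a := by
  induction l generalizing s with
  | nil => simp [pvScanA, pvMatches_nil]
  | cons x l ih =>
    rw [pvMatches_cons, pvScanA_cons]
    by_cases h : pvMatch tk x
    · simp [h]
    · simp [h, ih]

lemma pvScanA_none (tk : List String) (l : List (List (String × String))) (s : Int) :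
    pvScanA tk l s none =
      match pvMatches tk l s with
      | [] => none
      | [a] => some a
      | _ :: b :: _ => some b := by
  induction l generalizing s with
  | nil => simp [pvScanA, pvMatches_nil]
  | cons x l ih =>
    rw [pvMatches_cons, pvScanA_cons]
    by_cases h : pvMatch tk x
    · simp only [h, if_pos, pvScanA_some]
      cases hm : pvMatches tk l (s + 1) <;> simp
    · simp [h, ih]

-- members of pvMatches lie in [s, s + len)
lemma pvMatches_mem_bounds (tk : List String) (l : List (List (String × String))) (s a : Int)
    (hm : a ∈ pvMatches tk l s) : s ≤ a ∧ a < s + l.length := by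
  simp only [pvMatches, List.mem_map, List.mem_filter] at hm
  obtain ⟨p, ⟨hp, _⟩, rfl⟩ := hm
  rw [PySem.List.mem_enumerate_iff] at hp
  obtain ⟨k, hk, rfl⟩ := hp
  refine ⟨by simp, by simp; omega⟩

-- B's match test with pre-lowered keywords equals A's pvMatch
lemma pvHit_eq (tk : List String) (x : List (String × String)) :
    (tk.map PySem.Str.lower).any (fun kw => PySem.Str.isIn kw (PySem.Str.lower (pvGetText x)))
      = pvMatch tk x := by
  simp [pvMatch, List.any_map, Function.comp_def]

-- characterisation of pvDropToMatch via pvMatches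
lemma dropToMatch_nil_of (tk : List String) (l : List (List (String × String))) (s : Int)
    (h : pvMatches tk l s = []) : pvDropToMatch (tk.map PySem.Str.lower) l = [] := by
  induction l generalizing s with
  | nil => rfl
  | cons x l ih =>
    rw [pvMatches_cons] at h
    by_cases hx : pvMatch tk x
    · simp [hx] at h
    · rw [pvDropToMatch, if_neg (by rw [pvHit_eq]; exact hx)]
      exact ih (s + 1) (by simpa [hx] using h)

lemma dropToMatch_cons_of (tk : List String) (l : List (List (String × String))) (s a : Int)
    (rest : List Int) (h : pvMatches tk l s = a :: rest) :
    pvDropToMatch (tk.map PySem.Str.lower) l = l.drop (a - s).toNat ∧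
    ∃ x xs, l.drop (a - s).toNat = x :: xs ∧ pvMatches tk xs (a + 1) = rest := by
  induction l generalizing s with
  | nil => simp [pvMatches_nil] at h
  | cons x l ih =>
    rw [pvMatches_cons] at h
    by_cases hx : pvMatch tk x
    · rw [if_pos hx] at h
      obtain ⟨rfl, hrest⟩ : s = a ∧ pvMatches tk l (s + 1) = rest := by
        cases h; exact ⟨rfl, rfl⟩
      refine ⟨?_, x, l, ?_, hrest⟩
      · rw [pvDropToMatch, if_pos (by rw [pvHit_eq]; exact hx)]
        simp
      · simp
    · rw [if_neg hx] at h
      have hb := pvMatches_mem_bounds tk l (s + 1) a (by rw [h]; exact List.mem_cons_self)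
      obtain ⟨h1, h2⟩ := ih (s + 1) h
      constructor
      · rw [pvDropToMatch, if_neg (by rw [pvHit_eq]; exact hx),
          show (a - s).toNat = (a - (s+1)).toNat + 1 from by omega, List.drop_succ_cons]
        exact h1
      · obtain ⟨y, ys, hdrop, hmm⟩ := h2
        exact ⟨y, ys, by
          rw [show (a - s).toNat = (a - (s+1)).toNat + 1 from by omega, List.drop_succ_cons, hdrop], hmm⟩

-- A's range/pyGetD block equals the take of the drop, when 0 ≤ h < len
lemma block_eq (l : List (List (String × String))) (h m : Int)
    (h0 : 0 ≤ h) (hl : h < l.length) :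
    (PySem.List.pyRange h (min (h + 1 + m) (l.length : Int)) 1).map
        (fun j => PySem.List.pyGetD l j ([] : List (String × String)))
      = (l.drop h.toNat).take (max (m + 1) 0).toNat := by
  rw [PySem.List.pyRange_one]
  apply List.ext_getElem
  · simp [List.length_take, List.length_drop]
    omega
  · intro k h1 h2
    simp only [List.getElem_map, List.getElem_range]
    rw [List.getElem_take, List.getElem_drop]
    rw [PySem.List.pyGetD_eq_getElem]
    · congr 1
      simp at h1
      omega
    · simp at h1; omega
    · simp at h1; omega

-- ===== VERDICT (by name: the statement is the Claim_ definition above) =====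
theorem find_section_block_spec : Claim_equal_find_section_block := by
  intro paragraphs tk m _
  unfold Spec_find_section_block find_section_block find_section_block_alt
  rw [pvScanA_none]
  dsimp only
  have hbound : ∀ a ∈ pvMatches tk paragraphs 0, 0 ≤ a ∧ a < (paragraphs.length : Int) := by
    intro a ha
    have := pvMatches_mem_bounds tk paragraphs 0 a ha
    omega
  cases hm : pvMatches tk paragraphs 0 with
  | nil =>
    rw [dropToMatch_nil_of tk paragraphs 0 hm]
  | cons a rest =>
    obtain ⟨hdrop, x, xs, hx, hmx⟩ := dropToMatch_cons_of tk paragraphs 0 a rest hm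
    have ha := hbound a (by rw [hm]; exact List.mem_cons_self)
    rw [show a - 0 = a from by ring] at hdrop hx
    rw [hdrop, hx]
    dsimp only
    cases rest with
    | nil =>
      -- single match: heading = a, second drop is empty
      rw [dropToMatch_nil_of tk xs (a + 1) hmx]
      dsimp only
      rw [PySem.List.foldl_append_singleton_eq_map, List.nil_append,
        show (fun j => pvGetText (PySem.List.pyGetD paragraphs j []))
          = pvGetText ∘ (fun j => PySem.List.pyGetD paragraphs j ([] : List (String × String))) from rfl,
        ← List.map_map, block_eq paragraphs a m ha.1 ha.2, ← hx]
      simp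
    | cons b rest' =>
      -- two matches: heading = b, second drop is nonempty
      have hb := hbound b (by rw [hm]; exact List.mem_cons_of_mem _ List.mem_cons_self)
      have hab : a < b := by
        have := pvMatches_mem_bounds tk xs (a + 1) b (by rw [hmx]; exact List.mem_cons_self)
        omega
      obtain ⟨hdrop2, y, ys, hy, _⟩ := dropToMatch_cons_of tk xs (a + 1) b rest' hmx
      have hxs : xs = paragraphs.drop (a.toNat + 1) := by
        have hd : (paragraphs.drop a.toNat).drop 1 = xs := by rw [hx]; rfl
        rw [← hd, List.drop_drop]
      have hdrop2' : pvDropToMatch (tk.map PySem.Str.lower) xs = paragraphs.drop b.toNat := by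
        rw [hdrop2, hxs, List.drop_drop]
        congr 1
        omega
      have hne : (paragraphs.drop b.toNat).isEmpty = false := by
        rw [← hdrop2', hdrop2, hy]
        rfl
      rw [hdrop2', hne]
      simp only [Bool.false_eq_true, if_false]
      rw [PySem.List.foldl_append_singleton_eq_map, List.nil_append,
        show (fun j => pvGetText (PySem.List.pyGetD paragraphs j []))
          = pvGetText ∘ (fun j => PySem.List.pyGetD paragraphs j ([] : List (String × String))) from rfl,
        ← List.map_map, block_eq paragraphs b m hb.1 hb.2]
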